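-- pv_equiv track=rewrite | github.com/Billynom8/DVD | app.py | calculate_segments
-- ===== SOURCE A (Python) =====
-- def calculate_segments(T, window_size, overlap):
--     """Calculate number of segments and final chunk size."""
--     if T <= window_size:
--         return 1, T
--
--     segments = [(0, window_size)]
--     start = window_size - overlap
--     while start < T:
--         end = min(start + window_size, T)
--         segments.append((start, end))
--         start += window_size - overlap
--
--     final_chunk = T - segments[-1][0]
--     return len(segments), final_chunk
-- ===== SOURCE B (Python) =====
-- def calculate_segments(T, window_size, overlap):
--     """Calculate number of segments and final chunk size."""
--     if T <= window_size:
--         return 1, T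
--     step = window_size - overlap
--     n = (T - 1) // step  # number of extra segments after the first (closed form)
--     if n < 0:
--         n = 0
--     return n + 1, T - n * step
-- ===== Notes on version B (the rewrite author's own statement) =====
-- stated objective: simpler
-- what changed: Replaces the while-loop that materialises every segment in a list with a closed-form arithmetic computation: extra segments n = max(0, (T-1)//step), result (n+1, T - n*step).
-- outside the precondition, e.g. on calculate_segments(-2147483647, -2147483648, -1): A returns (1, -2147483647), B returns (2, 0)
import Mathlib
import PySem

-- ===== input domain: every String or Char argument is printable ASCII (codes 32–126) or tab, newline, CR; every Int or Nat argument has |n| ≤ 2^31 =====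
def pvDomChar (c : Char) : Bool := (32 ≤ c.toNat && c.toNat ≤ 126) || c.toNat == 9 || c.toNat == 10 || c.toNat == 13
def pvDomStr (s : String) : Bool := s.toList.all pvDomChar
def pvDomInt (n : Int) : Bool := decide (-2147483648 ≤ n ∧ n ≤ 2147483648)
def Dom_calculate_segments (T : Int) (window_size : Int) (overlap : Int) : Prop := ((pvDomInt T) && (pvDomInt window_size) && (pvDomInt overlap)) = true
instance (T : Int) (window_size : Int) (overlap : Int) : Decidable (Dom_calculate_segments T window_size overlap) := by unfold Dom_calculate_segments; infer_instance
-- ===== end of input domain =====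

-- B replaces A's segment-materialising while-loop with closed-form arithmetic (objective: simpler).


-- ===== PORT A =====
def calcLoop (T step ws : Int) (start : Int) (segs : List (Int × Int)) : List (Int × Int) :=
  -- 'while start < T': the conjunct '0 < step' is a totality guard only (Python diverges when step ≤ 0;
  -- Pre_ excludes those inputs)
  if _h : start < T ∧ 0 < step then
    calcLoop T step ws (start + step) (segs ++ [(start, min (start + ws) T)])
  else segs
termination_by (T - start).toNat
decreasing_by omega

def calculate_segments (T : Int) (window_size : Int) (overlap : Int) : Int × Int :=
  if T ≤ window_size then (1, T)
  else
    let segs := calcLoop T (window_size - overlap) window_size (window_size - overlap) [(0, window_size)]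
    ((segs.length : Int), T - (segs.getLastD (0, 0)).1)


-- ===== PORT B =====
def calculate_segments_alt (T : Int) (window_size : Int) (overlap : Int) : Int × Int :=
  if T ≤ window_size then (1, T)
  else
    let step := window_size - overlap
    let n0 := PySem.Int.floordiv (T - 1) step
    let n := if n0 < 0 then 0 else n0
    (n + 1, T - n * step)


-- ===== PRECONDITION & SPEC =====
-- Pre_ excludes the inputs with a non-positive step (T > window_size and overlap >= window_size),
-- outside the natural sliding-window domain: there A's while-loop diverges whenever it starts, and
-- returns only degenerately (empty loop, when the first step already reaches past T).
def Pre_calculate_segments (T : Int) (window_size : Int) (overlap : Int) : Prop :=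
  T ≤ window_size ∨ overlap < window_size
instance (T : Int) (window_size : Int) (overlap : Int) : Decidable (Pre_calculate_segments T window_size overlap) := by unfold Pre_calculate_segments; infer_instance
def pvWitness_calculate_segments : Int × Int × Int := (10, 4, 2)
def Spec_calculate_segments (T : Int) (window_size : Int) (overlap : Int) (out : Int × Int) : Prop := out = calculate_segments_alt T window_size overlap
instance (T : Int) (window_size : Int) (overlap : Int) (out : Int × Int) : Decidable (Spec_calculate_segments T window_size overlap out) := by unfold Spec_calculate_segments; infer_instance

-- ===== CLAIM (what is proved, stated in full; the proofs are below) =====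
def Claim_equal_calculate_segments : Prop := ∀ (T : Int) (window_size : Int) (overlap : Int), Dom_calculate_segments T window_size overlap → Pre_calculate_segments T window_size overlap → Spec_calculate_segments T window_size overlap (calculate_segments T window_size overlap)

-- ===== LEMMAS AND PROOFS =====


theorem calcLoop_char (T step ws : Int) (hstep : 0 < step) :
    ∀ start segs (d : Int × Int), start < T →
      ((calcLoop T step ws start segs).length : Int)
          = segs.length + (T - 1 - start) / step + 1 ∧
      ((calcLoop T step ws start segs).getLastD d).1
          = start + ((T - 1 - start) / step) * step := by
  suffices H : ∀ (n : Nat) start segs (d : Int × Int), (T - start).toNat = n → start < T →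
      ((calcLoop T step ws start segs).length : Int)
          = segs.length + (T - 1 - start) / step + 1 ∧
      ((calcLoop T step ws start segs).getLastD d).1
          = start + ((T - 1 - start) / step) * step by
    intro start segs d h; exact H _ start segs d rfl h
  intro n
  induction n using Nat.strong_induction_on with
  | _ n IH =>
    intro start segs d hn hlt
    rw [calcLoop, dif_pos ⟨hlt, hstep⟩]
    by_cases h2 : start + step < T
    · obtain ⟨ih1, ih2⟩ := IH (T - (start + step)).toNat (by omega)
        (start + step) (segs ++ [(start, min (start + ws) T)]) d rfl h2
      have hq : (T - 1 - start) / step = (T - 1 - (start + step)) / step + 1 := by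
        have h3 : T - 1 - start = (T - 1 - (start + step)) + 1 * step := by ring
        rw [h3, Int.add_mul_ediv_right _ _ (ne_of_gt hstep)]
      constructor
      · rw [ih1]; simp only [List.length_append, List.length_cons, List.length_nil]
        push_cast; omega
      · rw [ih2, hq]; ring
    · rw [calcLoop, dif_neg (fun h => h2 h.1)]
      have hq : (T - 1 - start) / step = 0 :=
        Int.ediv_eq_zero_of_lt (by omega) (by omega)
      constructor
      · simp only [List.length_append, List.length_cons, List.length_nil, hq]
        push_cast; omega
      · simp [hq]

-- ===== VERDICT (by name: the statement is the Claim_ definition above) =====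
-- ===== VERDICT (by name: the statement is the Claim_ definition above) =====
theorem calculate_segments_spec : Claim_equal_calculate_segments := by
  intro T ws ov _ hpre
  unfold Spec_calculate_segments calculate_segments calculate_segments_alt
  by_cases hT : T ≤ ws
  · simp [hT]
  · have hstep : 0 < ws - ov := by rcases hpre with h | h <;> omega
    rw [if_neg hT, if_neg hT]
    simp only [PySem.Int.floordiv_eq_ediv_of_pos hstep]
    by_cases h1 : ws - ov < T
    · obtain ⟨h1', h2'⟩ := calcLoop_char T (ws - ov) ws hstep (ws - ov) [(0, ws)] (0, 0) h1
      have hq : (T - 1) / (ws - ov) = (T - 1 - (ws - ov)) / (ws - ov) + 1 := by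
        have h3 := Int.add_mul_ediv_right (T - 1 - (ws - ov)) 1 (ne_of_gt hstep)
        have h4 : T - 1 - (ws - ov) + 1 * (ws - ov) = T - 1 := by ring
        rw [h4] at h3; omega
      have hnn : 0 ≤ (T - 1 - (ws - ov)) / (ws - ov) := Int.ediv_nonneg (by omega) (le_of_lt hstep)
      have hneg : ¬ ((T - 1) / (ws - ov) < 0) := by omega
      simp only [hneg, if_false, Prod.mk.injEq]
      refine ⟨by rw [h1']; simp; omega, ?_⟩
      rw [h2', hq]; ring
    · rw [calcLoop, dif_neg (fun h => h1 h.1)]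
      by_cases hneg : (T - 1) / (ws - ov) < 0
      · simp [hneg]
      · have hTpos : 0 ≤ T - 1 := by
          by_contra h
          exact hneg (Int.ediv_neg_of_neg_of_pos (by omega) hstep)
        have h0 : (T - 1) / (ws - ov) = 0 :=
          Int.ediv_eq_zero_of_lt hTpos (by omega)
        simp [h0]
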